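-- pv_equiv track=rewrite | github.com/chikinx33/Flowment | patch_index.py | replace_nav
-- ===== SOURCE A (Python) =====
-- nav_html = """
--         <!-- Floating Bottom Navigation Bar -->
--         <div class="fixed bottom-6 left-0 right-0 z-50 flex justify-center px-4 pointer-events-none">
--             <nav class="pointer-events-auto flex justify-between items-center w-full max-w-sm glass-nav rounded-[2rem] px-6 py-3 shadow-glass dark:shadow-glass-dark transition-all duration-300">
--                 <a class="flex flex-col items-center gap-1 text-slate-400 hover:text-primary dark:hover:text-indigo-400 transition-colors PATTERN_HOME" href="/">
--                     <span class="material-symbols-outlined text-[26px]">home</span>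
--                 </a>
--                 <a class="flex flex-col items-center gap-1 text-slate-400 hover:text-primary dark:hover:text-indigo-400 transition-colors PATTERN_CALENDAR" href="/calendar">
--                     <span class="material-symbols-outlined text-[26px]">calendar_month</span>
--                 </a>
--                 <div class="relative -top-6 transform hover:scale-105 transition-transform">
--                     <button onclick="window.location.href='/write'" class="bg-primary hover:bg-indigo-500 text-white size-14 rounded-full flex items-center justify-center shadow-lg shadow-primary/40 ring-[6px] ring-white/50 dark:ring-slate-900/50 transition-all duration-300">
--                         <span class="material-symbols-outlined text-3xl">add</span>
--                     </button>
--                 </div>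
--                 <a class="flex flex-col items-center gap-1 text-slate-400 hover:text-primary dark:hover:text-indigo-400 transition-colors PATTERN_TIMELINE" href="/timeline">
--                     <span class="material-symbols-outlined text-[26px]">history</span>
--                 </a>
--                 <a class="flex flex-col items-center gap-1 text-slate-400 hover:text-primary dark:hover:text-indigo-400 transition-colors PATTERN_SETTINGS" href="/settings">
--                     <span class="material-symbols-outlined text-[26px]">tune</span>
--                 </a>
--             </nav>
--         </div>"""
--
-- def replace_nav(html, page):
--     nav = nav_html
--     patterns = ['PATTERN_HOME', 'PATTERN_CALENDAR', 'PATTERN_TIMELINE', 'PATTERN_SETTINGS']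
--
--     # Reset all to inactive
--     for p in patterns:
--         nav = nav.replace(p, '')
--
--     # Set active
--     if page == 'home':
--         nav = nav_html.replace('PATTERN_HOME', 'text-primary dark:text-indigo-400')
--     elif page == 'calendar':
--         nav = nav_html.replace('PATTERN_CALENDAR', 'text-primary dark:text-indigo-400')
--     elif page == 'timeline':
--         nav = nav_html.replace('PATTERN_TIMELINE', 'text-primary dark:text-indigo-400')
--     elif page == 'settings':
--         nav = nav_html.replace('PATTERN_SETTINGS', 'text-primary dark:text-indigo-400')
--
--     # Clean up remainders
--     for p in patterns:
--         nav = nav.replace(p, '')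
--
--     return nav
-- ===== SOURCE B (Python) =====
-- # The nav template split once into its five literal segments around the four
-- # placeholder slots; replace_nav just interpolates the active class (or '') into
-- # each slot and joins -- no str.replace scanning at all.
--
-- _ACTIVE = 'text-primary dark:text-indigo-400'
-- _SLOTS = ['home', 'calendar', 'timeline', 'settings']
-- _SEGS = [
--     '\n        <!-- Floating Bottom Navigation Bar -->\n        <div class="fixed bottom-6 left-0 right-0 z-50 flex justify-center px-4 pointer-events-none">\n            <nav class="pointer-events-auto flex justify-between items-center w-full max-w-sm glass-nav rounded-[2rem] px-6 py-3 shadow-glass dark:shadow-glass-dark transition-all duration-300">\n                <a class="flex flex-col items-center gap-1 text-slate-400 hover:text-primary dark:hover:text-indigo-400 transition-colors ',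
--     '" href="/">\n                    <span class="material-symbols-outlined text-[26px]">home</span>\n                </a>\n                <a class="flex flex-col items-center gap-1 text-slate-400 hover:text-primary dark:hover:text-indigo-400 transition-colors ',
--     '" href="/calendar">\n                    <span class="material-symbols-outlined text-[26px]">calendar_month</span>\n                </a>\n                <div class="relative -top-6 transform hover:scale-105 transition-transform">\n                    <button onclick="window.location.href=\'/write\'" class="bg-primary hover:bg-indigo-500 text-white size-14 rounded-full flex items-center justify-center shadow-lg shadow-primary/40 ring-[6px] ring-white/50 dark:ring-slate-900/50 transition-all duration-300">\n                        <span class="material-symbols-outlined text-3xl">add</span>\n                    </button>\n                </div>\n                <a class="flex flex-col items-center gap-1 text-slate-400 hover:text-primary dark:hover:text-indigo-400 transition-colors ',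
--     '" href="/timeline">\n                    <span class="material-symbols-outlined text-[26px]">history</span>\n                </a>\n                <a class="flex flex-col items-center gap-1 text-slate-400 hover:text-primary dark:hover:text-indigo-400 transition-colors ',
--     '" href="/settings">\n                    <span class="material-symbols-outlined text-[26px]">tune</span>\n                </a>\n            </nav>\n        </div>',
-- ]
--
-- def replace_nav(html, page):
--     pieces = [_SEGS[0]]
--     for name, seg in zip(_SLOTS, _SEGS[1:]):
--         pieces += [_ACTIVE if name == page else '', seg]
--     return ''.join(pieces)
-- ===== Notes on version B (the rewrite author's own statement) =====
-- stated objective: simpler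
-- what changed: A's nine str.replace scans over the whole template (a dead strip pass, an if/elif chain, a second strip pass) are replaced by a slot-interpolation: the template is kept as five literal segments around the four slots, and the function just joins segments with the active class (or '') filled into each slot -- no replace/search at all.
import Mathlib
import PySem

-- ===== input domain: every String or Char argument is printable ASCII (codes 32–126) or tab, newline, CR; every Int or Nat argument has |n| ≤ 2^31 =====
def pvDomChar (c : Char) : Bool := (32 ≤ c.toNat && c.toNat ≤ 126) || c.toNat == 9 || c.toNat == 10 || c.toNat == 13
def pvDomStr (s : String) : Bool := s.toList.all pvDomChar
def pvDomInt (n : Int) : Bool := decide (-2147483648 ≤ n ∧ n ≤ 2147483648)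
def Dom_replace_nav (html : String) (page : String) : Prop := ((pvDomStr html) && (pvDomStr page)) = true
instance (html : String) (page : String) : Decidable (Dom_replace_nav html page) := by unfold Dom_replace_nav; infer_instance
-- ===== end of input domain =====

set_option maxRecDepth 40000


-- B replaces A's three str.replace passes over the template by a one-time split of the
-- template into five literal segments around the four slots, filled by direct
-- interpolation and join (objective: simpler; no replace scanning).

-- shared string constants: the five segments of nav_html around the four tokens,
-- nav_html itself (A's module constant), and the active class
def pvSeg0 : String := "\n        <!-- Floating Bottom Navigation Bar -->\n        <di" ++ "v class=\"fixed bottom-6 left-0 right-0 z-50 flex justify-cen" ++ "ter px-4 pointer-events-none\">\n            <nav class=\"point" ++ "er-events-auto flex justify-between items-center w-full max-" ++ "w-sm glass-nav rounded-[2rem] px-6 py-3 shadow-glass dark:sh" ++ "adow-glass-dark transition-all duration-300\">\n              " ++ "  <a class=\"flex flex-col items-center gap-1 text-slate-400 " ++ "hover:text-primary dark:hover:text-indigo-400 transition-col" ++ "ors "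
def pvSeg1 : String := "\" href=\"/\">\n                    <span class=\"material-symbol" ++ "s-outlined text-[26px]\">home</span>\n                </a>\n   " ++ "             <a class=\"flex flex-col items-center gap-1 text" ++ "-slate-400 hover:text-primary dark:hover:text-indigo-400 tra" ++ "nsition-colors "
def pvSeg2 : String := "\" href=\"/calendar\">\n                    <span class=\"materia" ++ "l-symbols-outlined text-[26px]\">calendar_month</span>\n      " ++ "          </a>\n                <div class=\"relative -top-6 t" ++ "ransform hover:scale-105 transition-transform\">\n            " ++ "        <button onclick=\"window.location.href='/write'\" clas" ++ "s=\"bg-primary hover:bg-indigo-500 text-white size-14 rounded" ++ "-full flex items-center justify-center shadow-lg shadow-prim" ++ "ary/40 ring-[6px] ring-white/50 dark:ring-slate-900/50 trans" ++ "ition-all duration-300\">\n                        <span class" ++ "=\"material-symbols-outlined text-3xl\">add</span>\n           " ++ "         </button>\n                </div>\n                <a" ++ " class=\"flex flex-col items-center gap-1 text-slate-400 hove" ++ "r:text-primary dark:hover:text-indigo-400 transition-colors "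
def pvSeg3 : String := "\" href=\"/timeline\">\n                    <span class=\"materia" ++ "l-symbols-outlined text-[26px]\">history</span>\n             " ++ "   </a>\n                <a class=\"flex flex-col items-center" ++ " gap-1 text-slate-400 hover:text-primary dark:hover:text-ind" ++ "igo-400 transition-colors "
def pvSeg4 : String := "\" href=\"/settings\">\n                    <span class=\"materia" ++ "l-symbols-outlined text-[26px]\">tune</span>\n                " ++ "</a>\n            </nav>\n        </div>"

def pvNavHtml : String := pvSeg0 ++ ("PATTERN_HOME" ++ (pvSeg1 ++ ("PATTERN_CALENDAR" ++ (pvSeg2 ++ ("PATTERN_TIMELINE" ++ (pvSeg3 ++ ("PATTERN_SETTINGS" ++ pvSeg4)))))))  -- the nav_html module literal, assembled from the shared segment constants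

def pvActive : String := "text-primary dark:text-indigo-400"

-- ===== PORT A =====
def pvPatterns : List String := ["PATTERN_HOME", "PATTERN_CALENDAR", "PATTERN_TIMELINE", "PATTERN_SETTINGS"]

def replace_nav (html : String) (page : String) : String :=
  let nav := pvNavHtml
  -- Reset all to inactive
  let nav := pvPatterns.foldl (fun nav p => PySem.Str.replace nav p "") nav
  -- Set active
  let nav :=
    if page = "home" then PySem.Str.replace pvNavHtml "PATTERN_HOME" pvActive
    else if page = "calendar" then PySem.Str.replace pvNavHtml "PATTERN_CALENDAR" pvActive
    else if page = "timeline" then PySem.Str.replace pvNavHtml "PATTERN_TIMELINE" pvActive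
    else if page = "settings" then PySem.Str.replace pvNavHtml "PATTERN_SETTINGS" pvActive
    else nav
  -- Clean up remainders
  pvPatterns.foldl (fun nav p => PySem.Str.replace nav p "") nav

-- ===== PORT B =====
def pvSlots : List String := ["home", "calendar", "timeline", "settings"]
def pvSegs : List String := [pvSeg0, pvSeg1, pvSeg2, pvSeg3, pvSeg4]

def replace_nav_alt (html : String) (page : String) : String :=
  -- pieces = [_SEGS[0]]; for name, seg in zip(_SLOTS, _SEGS[1:]): pieces += [_ACTIVE if name == page else '', seg]
  let pieces :=
    (pvSlots.zip (PySem.List.slice pvSegs (some 1) none)).foldl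
      (fun acc ns => acc ++ [if ns.1 = page then pvActive else "", ns.2]) [pvSeg0]
  -- ''.join(pieces)
  PySem.Str.join "" pieces

-- ===== PRECONDITION & SPEC =====
def Spec_replace_nav (html : String) (page : String) (out : String) : Prop := out = replace_nav_alt html page
instance (html : String) (page : String) (out : String) : Decidable (Spec_replace_nav html page out) := by unfold Spec_replace_nav; infer_instance

-- ===== CLAIM (what is proved, stated in full; the proofs are below) =====
def Claim_equal_replace_nav : Prop := ∀ (html : String) (page : String), Dom_replace_nav html page → Spec_replace_nav html page (replace_nav html page)

-- ===== LEMMAS AND PROOFS =====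

-- token, active-class and segment character lists
def tH : List Char := ("PATTERN_HOME" : String).toList
def tC : List Char := ("PATTERN_CALENDAR" : String).toList
def tT : List Char := ("PATTERN_TIMELINE" : String).toList
def tS : List Char := ("PATTERN_SETTINGS" : String).toList
def actL : List Char := ("text-primary dark:text-indigo-400" : String).toList
def g0 : List Char := pvSeg0.toList
def g1 : List Char := pvSeg1.toList
def g2 : List Char := pvSeg2.toList
def g3 : List Char := pvSeg3.toList
def g4 : List Char := pvSeg4.toList

-- the nav template: segments g0..g4 (none of which contains 'P') around the four tokens
def F (w0 w1 w2 w3 : List Char) : List Char :=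
  g0 ++ (w0 ++ (g1 ++ (w1 ++ (g2 ++ (w2 ++ (g3 ++ (w3 ++ g4)))))))

-- a simple fuel-free model of PySem.Chars.replace.go (old nonempty)
def rep1 (old new : List Char) : List Char → List Char
  | [] => []
  | c :: t =>
    if old.isPrefixOf (c :: t) ∧ old ≠ [] then new ++ rep1 old new (t.drop (old.length - 1))
    else c :: rep1 old new t
termination_by l => l.length
decreasing_by
  · simp only [List.length_cons, List.length_drop]; omega
  · simp only [List.length_cons]; omega

theorem go_eq_rep1 (old new : List Char) (hold : old ≠ []) :
    ∀ (fuel : Nat) (l acc : List Char), l.length ≤ fuel →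
      PySem.Chars.replace.go old new fuel l acc = acc.reverse ++ rep1 old new l := by
  intro fuel
  induction fuel with
  | zero =>
    intro l acc h
    have hl : l = [] := by cases l <;> simp_all
    subst hl
    simp [PySem.Chars.replace.go, rep1]
  | succ n ih =>
    intro l acc h
    cases l with
    | nil => simp [PySem.Chars.replace.go, rep1]
    | cons c t =>
      by_cases hp : old.isPrefixOf (c :: t)
      · obtain ⟨o, otl, rfl⟩ : ∃ o otl, old = o :: otl := by
          cases old with
          | nil => exact absurd rfl hold
          | cons o otl => exact ⟨o, otl, rfl⟩
        rw [show PySem.Chars.replace.go (o :: otl) new (n+1) (c :: t) acc =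
              PySem.Chars.replace.go (o :: otl) new n (List.drop (o :: otl).length (c :: t)) (new.reverse ++ acc) by
            simp [PySem.Chars.replace.go, hp]]
        have hdrop : List.drop (o :: otl).length (c :: t) = t.drop ((o :: otl).length - 1) := by
          simp [List.length_cons]
        rw [hdrop, ih _ _ (by simp only [List.length_drop]; simp at h; omega)]
        rw [show rep1 (o :: otl) new (c :: t) = new ++ rep1 (o :: otl) new (t.drop ((o :: otl).length - 1)) by
          rw [rep1]; rw [if_pos ⟨hp, hold⟩]]
        simp
      · rw [show PySem.Chars.replace.go old new (n+1) (c :: t) acc =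
              PySem.Chars.replace.go old new n t (c :: acc) by
            simp [PySem.Chars.replace.go, hp]]
        rw [ih _ _ (by simp at h; omega)]
        rw [show rep1 old new (c :: t) = c :: rep1 old new t by
          rw [rep1]; rw [if_neg (by intro hx; exact hp hx.1)]]
        simp

theorem replace_eq_rep1 (s o n : String) (hold : o.toList ≠ []) :
    PySem.Str.replace s o n = String.ofList (rep1 o.toList n.toList s.toList) := by
  unfold PySem.Str.replace PySem.Chars.replace
  rw [if_neg (by simpa [List.isEmpty_iff] using hold)]
  rw [go_eq_rep1 _ _ hold _ _ _ (by simp)]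
  simp

theorem replace_eq_H (s n : String) : PySem.Str.replace s "PATTERN_HOME" n = String.ofList (rep1 tH n.toList s.toList) := replace_eq_rep1 s _ n (by decide)
theorem replace_eq_C (s n : String) : PySem.Str.replace s "PATTERN_CALENDAR" n = String.ofList (rep1 tC n.toList s.toList) := replace_eq_rep1 s _ n (by decide)
theorem replace_eq_T (s n : String) : PySem.Str.replace s "PATTERN_TIMELINE" n = String.ofList (rep1 tT n.toList s.toList) := replace_eq_rep1 s _ n (by decide)
theorem replace_eq_S (s n : String) : PySem.Str.replace s "PATTERN_SETTINGS" n = String.ofList (rep1 tS n.toList s.toList) := replace_eq_rep1 s _ n (by decide)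

-- a piece the scan can walk over: the token itself, a 'P'-free block, or another token
def Ok (old p : List Char) : Prop :=
  p = old ∨ 'P' ∉ p ∨ (∃ ptl, p = 'P' :: ptl ∧ 'P' ∉ ptl ∧ ¬ old <+: p ∧ ¬ p <+: old)

def out (old v p : List Char) : List Char := if p = old then v else p

theorem out_self (old v : List Char) : out old v old = v := by simp [out]
theorem out_ne (old v p : List Char) (h : p ≠ old) : out old v p = p := by simp [out, h]

theorem rep1_nil (old v : List Char) : rep1 old v [] = [] := by rw [rep1]

theorem rep1_seg (old otl v a l : List Char) (hold : old = 'P' :: otl) (h : 'P' ∉ a) :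
    rep1 old v (a ++ l) = a ++ rep1 old v l := by
  induction a with
  | nil => simp
  | cons d a' ih =>
    have hd : d ≠ 'P' := fun hdp => h (hdp ▸ List.mem_cons_self ..)
    have hnp : ¬ old.isPrefixOf (d :: (a' ++ l)) := by
      subst hold; simp [List.isPrefixOf]; intro hc; exact absurd hc.symm hd
    rw [List.cons_append, rep1, if_neg (fun hx => hnp hx.1), ih (fun hm => h (List.mem_cons_of_mem _ hm))]
    simp

theorem rep1_match (old otl v l : List Char) (hold : old = 'P' :: otl) :
    rep1 old v (old ++ l) = v ++ rep1 old v l := by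
  have h1 : old ++ l = 'P' :: (otl ++ l) := by rw [hold]; simp
  have hpre : old.isPrefixOf (old ++ l) := by
    rw [List.isPrefixOf_iff_prefix]; exact List.prefix_append _ _
  rw [h1, rep1, if_pos ⟨h1 ▸ hpre, by simp [hold]⟩]
  have : old.length - 1 = otl.length := by simp [hold]
  rw [this, List.drop_left]

theorem rep1_tok (old otl v p ptl l : List Char) (hold : old = 'P' :: otl)
    (hp : p = 'P' :: ptl) (hptl : 'P' ∉ ptl) (h1 : ¬ old <+: p) (h2 : ¬ p <+: old) :
    rep1 old v (p ++ l) = p ++ rep1 old v l := by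
  have hsplit : p ++ l = 'P' :: (ptl ++ l) := by rw [hp]; simp
  have hnp : ¬ old.isPrefixOf (p ++ l) := by
    rw [List.isPrefixOf_iff_prefix]
    intro hpre
    rcases List.prefix_or_prefix_of_prefix hpre (List.prefix_append p l) with h | h
    · exact h1 h
    · exact h2 h
  rw [hsplit, rep1, if_neg (fun hx => hnp (hsplit ▸ hx.1)),
      rep1_seg old otl v ptl l hold hptl, ← List.cons_append, ← hp]

theorem rep1_last (old otl v a : List Char) (hold : old = 'P' :: otl) (h : 'P' ∉ a) :
    rep1 old v a = a := by
  have := rep1_seg old otl v a [] hold h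
  simpa [rep1_nil] using this

theorem rep1_ok (old otl v p l : List Char) (hold : old = 'P' :: otl) (h : Ok old p) :
    rep1 old v (p ++ l) = out old v p ++ rep1 old v l := by
  rcases h with he | h | ⟨ptl, hp, hptl, h1, h2⟩
  · rw [he, rep1_match old otl v l hold, out_self]
  · have hne : p ≠ old := fun he => h (by rw [he, hold]; exact List.mem_cons_self ..)
    rw [rep1_seg old otl v p l hold h, out_ne old v p hne]
  · have hne : p ≠ old := fun he => h2 (he ▸ List.prefix_refl _)
    rw [rep1_tok old otl v p ptl l hold hp hptl h1 h2, out_ne old v p hne]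

theorem hg0 : 'P' ∉ g0 := by
  simp only [g0, pvSeg0, String.toList_append, List.mem_append, not_or]
  and_intros <;> decide
theorem hg1 : 'P' ∉ g1 := by
  simp only [g1, pvSeg1, String.toList_append, List.mem_append, not_or]
  and_intros <;> decide
theorem hg2 : 'P' ∉ g2 := by
  simp only [g2, pvSeg2, String.toList_append, List.mem_append, not_or]
  and_intros <;> decide
theorem hg3 : 'P' ∉ g3 := by
  simp only [g3, pvSeg3, String.toList_append, List.mem_append, not_or]
  and_intros <;> decide
theorem hg4 : 'P' ∉ g4 := by
  simp only [g4, pvSeg4, String.toList_append, List.mem_append, not_or]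
  and_intros <;> decide

theorem hact : 'P' ∉ actL := by decide

theorem repF (old otl v w0 w1 w2 w3 : List Char) (hold : old = 'P' :: otl)
    (h0 : Ok old w0) (h1 : Ok old w1) (h2 : Ok old w2) (h3 : Ok old w3) :
    rep1 old v (F w0 w1 w2 w3) = F (out old v w0) (out old v w1) (out old v w2) (out old v w3) := by
  unfold F
  rw [rep1_seg old otl v g0 _ hold hg0, rep1_ok old otl v w0 _ hold h0,
      rep1_seg old otl v g1 _ hold hg1, rep1_ok old otl v w1 _ hold h1,
      rep1_seg old otl v g2 _ hold hg2, rep1_ok old otl v w2 _ hold h2,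
      rep1_seg old otl v g3 _ hold hg3, rep1_ok old otl v w3 _ hold h3,
      rep1_last old otl v g4 hold hg4]

theorem holdH : tH = 'P' :: ("ATTERN_HOME" : String).toList := by decide
theorem holdC : tC = 'P' :: ("ATTERN_CALENDAR" : String).toList := by decide
theorem holdT : tT = 'P' :: ("ATTERN_TIMELINE" : String).toList := by decide
theorem holdS : tS = 'P' :: ("ATTERN_SETTINGS" : String).toList := by decide

theorem ok_H_H : Ok tH tH := Or.inl rfl
theorem ok_H_C : Ok tH tC := Or.inr (Or.inr ⟨("ATTERN_CALENDAR" : String).toList, by decide, by decide, by decide, by decide⟩)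
theorem ok_H_T : Ok tH tT := Or.inr (Or.inr ⟨("ATTERN_TIMELINE" : String).toList, by decide, by decide, by decide, by decide⟩)
theorem ok_H_S : Ok tH tS := Or.inr (Or.inr ⟨("ATTERN_SETTINGS" : String).toList, by decide, by decide, by decide, by decide⟩)
theorem ok_H_act : Ok tH actL := Or.inr (Or.inl hact)
theorem ok_H_nil : Ok tH ([] : List Char) := Or.inr (Or.inl (by simp))
theorem ok_C_H : Ok tC tH := Or.inr (Or.inr ⟨("ATTERN_HOME" : String).toList, by decide, by decide, by decide, by decide⟩)
theorem ok_C_C : Ok tC tC := Or.inl rfl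
theorem ok_C_T : Ok tC tT := Or.inr (Or.inr ⟨("ATTERN_TIMELINE" : String).toList, by decide, by decide, by decide, by decide⟩)
theorem ok_C_S : Ok tC tS := Or.inr (Or.inr ⟨("ATTERN_SETTINGS" : String).toList, by decide, by decide, by decide, by decide⟩)
theorem ok_C_act : Ok tC actL := Or.inr (Or.inl hact)
theorem ok_C_nil : Ok tC ([] : List Char) := Or.inr (Or.inl (by simp))
theorem ok_T_H : Ok tT tH := Or.inr (Or.inr ⟨("ATTERN_HOME" : String).toList, by decide, by decide, by decide, by decide⟩)
theorem ok_T_C : Ok tT tC := Or.inr (Or.inr ⟨("ATTERN_CALENDAR" : String).toList, by decide, by decide, by decide, by decide⟩)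
theorem ok_T_T : Ok tT tT := Or.inl rfl
theorem ok_T_S : Ok tT tS := Or.inr (Or.inr ⟨("ATTERN_SETTINGS" : String).toList, by decide, by decide, by decide, by decide⟩)
theorem ok_T_act : Ok tT actL := Or.inr (Or.inl hact)
theorem ok_T_nil : Ok tT ([] : List Char) := Or.inr (Or.inl (by simp))
theorem ok_S_H : Ok tS tH := Or.inr (Or.inr ⟨("ATTERN_HOME" : String).toList, by decide, by decide, by decide, by decide⟩)
theorem ok_S_C : Ok tS tC := Or.inr (Or.inr ⟨("ATTERN_CALENDAR" : String).toList, by decide, by decide, by decide, by decide⟩)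
theorem ok_S_T : Ok tS tT := Or.inr (Or.inr ⟨("ATTERN_TIMELINE" : String).toList, by decide, by decide, by decide, by decide⟩)
theorem ok_S_S : Ok tS tS := Or.inl rfl
theorem ok_S_act : Ok tS actL := Or.inr (Or.inl hact)
theorem ok_S_nil : Ok tS ([] : List Char) := Or.inr (Or.inl (by simp))

theorem ne_C_H : tC ≠ tH := by decide
theorem ne_T_H : tT ≠ tH := by decide
theorem ne_S_H : tS ≠ tH := by decide
theorem ne_act_H : actL ≠ tH := by decide
theorem ne_nil_H : ([] : List Char) ≠ tH := by decide
theorem ne_H_C : tH ≠ tC := by decide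
theorem ne_T_C : tT ≠ tC := by decide
theorem ne_S_C : tS ≠ tC := by decide
theorem ne_act_C : actL ≠ tC := by decide
theorem ne_nil_C : ([] : List Char) ≠ tC := by decide
theorem ne_H_T : tH ≠ tT := by decide
theorem ne_C_T : tC ≠ tT := by decide
theorem ne_S_T : tS ≠ tT := by decide
theorem ne_act_T : actL ≠ tT := by decide
theorem ne_nil_T : ([] : List Char) ≠ tT := by decide
theorem ne_H_S : tH ≠ tS := by decide
theorem ne_C_S : tC ≠ tS := by decide
theorem ne_T_S : tT ≠ tS := by decide
theorem ne_act_S : actL ≠ tS := by decide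
theorem ne_nil_S : ([] : List Char) ≠ tS := by decide

theorem navLs : pvNavHtml.toList = F tH tC tT tS := by
  show (pvSeg0 ++ ("PATTERN_HOME" ++ (pvSeg1 ++ ("PATTERN_CALENDAR" ++ (pvSeg2 ++ ("PATTERN_TIMELINE" ++ (pvSeg3 ++ ("PATTERN_SETTINGS" ++ pvSeg4)))))))).toList = F tH tC tT tS
  rw [String.toList_append, String.toList_append, String.toList_append, String.toList_append,
      String.toList_append, String.toList_append, String.toList_append, String.toList_append]
  simp only [F, g0, g1, g2, g3, g4, tH, tC, tT, tS]

theorem emptyToList : ("" : String).toList = [] := rfl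
theorem actToList : (pvActive : String).toList = actL := rfl

-- two strings with the same character list are equal
theorem str_ext (a b : String) (h : a.toList = b.toList) : a = b := by
  have ha : String.ofList a.toList = a := String.ofList_toList
  have hb : String.ofList b.toList = b := String.ofList_toList
  rw [← ha, ← hb, h]

theorem toList_ite (c : Prop) [Decidable c] :
    (if c then pvActive else "").toList = (if c then actL else []) := by
  split_ifs
  · exact actToList
  · exact emptyToList

-- B's port evaluated: the five segments with the two fills decided by page
theorem alt_eval (html page : String) :
    replace_nav_alt html page = String.ofList
      (g0 ++ ((if "home" = page then actL else []) ++ (g1 ++ ((if "calendar" = page then actL else []) ++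
        (g2 ++ ((if "timeline" = page then actL else []) ++ (g3 ++ ((if "settings" = page then actL else []) ++ g4)))))))) := by
  apply str_ext
  simp only [replace_nav_alt, pvSlots, pvSegs, PySem.List.slice_from_one, List.tail_cons,
    List.zip_cons_cons, List.zip_nil_right, List.zip_nil_left, List.foldl_cons, List.foldl_nil,
    List.cons_append, List.nil_append, List.append_assoc]
  simp only [PySem.Str.toList_join, List.map_cons, List.map_nil, String.toList_ofList]
  simp only [PySem.Chars.join_nil, PySem.Chars.join_singleton, PySem.Chars.join_cons_cons,
    emptyToList, List.nil_append, List.append_nil, List.append_assoc, g0, g1, g2, g3, g4]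
  simp only [toList_ite]

theorem valA_H : rep1 tS ([] : List Char) (rep1 tT ([] : List Char) (rep1 tC ([] : List Char) (rep1 tH ([] : List Char) (rep1 tH actL (F tH tC tT tS))))) = F actL ([] : List Char) ([] : List Char) ([] : List Char) := by
  rw [repF tH _ actL _ _ _ _ holdH ok_H_H ok_H_C ok_H_T ok_H_S]
  simp only [out_self, out_ne _ _ _ ne_C_H, out_ne _ _ _ ne_T_H, out_ne _ _ _ ne_S_H]
  rw [repF tH _ ([] : List Char) _ _ _ _ holdH ok_H_act ok_H_C ok_H_T ok_H_S]
  simp only [out_ne _ _ _ ne_act_H, out_ne _ _ _ ne_C_H, out_ne _ _ _ ne_T_H, out_ne _ _ _ ne_S_H]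
  rw [repF tC _ ([] : List Char) _ _ _ _ holdC ok_C_act ok_C_C ok_C_T ok_C_S]
  simp only [out_ne _ _ _ ne_act_C, out_self, out_ne _ _ _ ne_T_C, out_ne _ _ _ ne_S_C]
  rw [repF tT _ ([] : List Char) _ _ _ _ holdT ok_T_act ok_T_nil ok_T_T ok_T_S]
  simp only [out_ne _ _ _ ne_act_T, out_ne _ _ _ ne_nil_T, out_self, out_ne _ _ _ ne_S_T]
  rw [repF tS _ ([] : List Char) _ _ _ _ holdS ok_S_act ok_S_nil ok_S_nil ok_S_S]
  simp only [out_ne _ _ _ ne_act_S, out_ne _ _ _ ne_nil_S, out_self]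
theorem valA_C : rep1 tS ([] : List Char) (rep1 tT ([] : List Char) (rep1 tC ([] : List Char) (rep1 tH ([] : List Char) (rep1 tC actL (F tH tC tT tS))))) = F ([] : List Char) actL ([] : List Char) ([] : List Char) := by
  rw [repF tC _ actL _ _ _ _ holdC ok_C_H ok_C_C ok_C_T ok_C_S]
  simp only [out_ne _ _ _ ne_H_C, out_self, out_ne _ _ _ ne_T_C, out_ne _ _ _ ne_S_C]
  rw [repF tH _ ([] : List Char) _ _ _ _ holdH ok_H_H ok_H_act ok_H_T ok_H_S]
  simp only [out_self, out_ne _ _ _ ne_act_H, out_ne _ _ _ ne_T_H, out_ne _ _ _ ne_S_H]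
  rw [repF tC _ ([] : List Char) _ _ _ _ holdC ok_C_nil ok_C_act ok_C_T ok_C_S]
  simp only [out_ne _ _ _ ne_nil_C, out_ne _ _ _ ne_act_C, out_ne _ _ _ ne_T_C, out_ne _ _ _ ne_S_C]
  rw [repF tT _ ([] : List Char) _ _ _ _ holdT ok_T_nil ok_T_act ok_T_T ok_T_S]
  simp only [out_ne _ _ _ ne_nil_T, out_ne _ _ _ ne_act_T, out_self, out_ne _ _ _ ne_S_T]
  rw [repF tS _ ([] : List Char) _ _ _ _ holdS ok_S_nil ok_S_act ok_S_nil ok_S_S]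
  simp only [out_ne _ _ _ ne_nil_S, out_ne _ _ _ ne_act_S, out_self]
theorem valA_T : rep1 tS ([] : List Char) (rep1 tT ([] : List Char) (rep1 tC ([] : List Char) (rep1 tH ([] : List Char) (rep1 tT actL (F tH tC tT tS))))) = F ([] : List Char) ([] : List Char) actL ([] : List Char) := by
  rw [repF tT _ actL _ _ _ _ holdT ok_T_H ok_T_C ok_T_T ok_T_S]
  simp only [out_ne _ _ _ ne_H_T, out_ne _ _ _ ne_C_T, out_self, out_ne _ _ _ ne_S_T]
  rw [repF tH _ ([] : List Char) _ _ _ _ holdH ok_H_H ok_H_C ok_H_act ok_H_S]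
  simp only [out_self, out_ne _ _ _ ne_C_H, out_ne _ _ _ ne_act_H, out_ne _ _ _ ne_S_H]
  rw [repF tC _ ([] : List Char) _ _ _ _ holdC ok_C_nil ok_C_C ok_C_act ok_C_S]
  simp only [out_ne _ _ _ ne_nil_C, out_self, out_ne _ _ _ ne_act_C, out_ne _ _ _ ne_S_C]
  rw [repF tT _ ([] : List Char) _ _ _ _ holdT ok_T_nil ok_T_nil ok_T_act ok_T_S]
  simp only [out_ne _ _ _ ne_nil_T, out_ne _ _ _ ne_act_T, out_ne _ _ _ ne_S_T]
  rw [repF tS _ ([] : List Char) _ _ _ _ holdS ok_S_nil ok_S_nil ok_S_act ok_S_S]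
  simp only [out_ne _ _ _ ne_nil_S, out_ne _ _ _ ne_act_S, out_self]
theorem valA_S : rep1 tS ([] : List Char) (rep1 tT ([] : List Char) (rep1 tC ([] : List Char) (rep1 tH ([] : List Char) (rep1 tS actL (F tH tC tT tS))))) = F ([] : List Char) ([] : List Char) ([] : List Char) actL := by
  rw [repF tS _ actL _ _ _ _ holdS ok_S_H ok_S_C ok_S_T ok_S_S]
  simp only [out_ne _ _ _ ne_H_S, out_ne _ _ _ ne_C_S, out_ne _ _ _ ne_T_S, out_self]
  rw [repF tH _ ([] : List Char) _ _ _ _ holdH ok_H_H ok_H_C ok_H_T ok_H_act]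
  simp only [out_self, out_ne _ _ _ ne_C_H, out_ne _ _ _ ne_T_H, out_ne _ _ _ ne_act_H]
  rw [repF tC _ ([] : List Char) _ _ _ _ holdC ok_C_nil ok_C_C ok_C_T ok_C_act]
  simp only [out_ne _ _ _ ne_nil_C, out_self, out_ne _ _ _ ne_T_C, out_ne _ _ _ ne_act_C]
  rw [repF tT _ ([] : List Char) _ _ _ _ holdT ok_T_nil ok_T_nil ok_T_T ok_T_act]
  simp only [out_ne _ _ _ ne_nil_T, out_self, out_ne _ _ _ ne_act_T]
  rw [repF tS _ ([] : List Char) _ _ _ _ holdS ok_S_nil ok_S_nil ok_S_nil ok_S_act]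
  simp only [out_ne _ _ _ ne_nil_S, out_ne _ _ _ ne_act_S]
theorem valA_none : rep1 tS ([] : List Char) (rep1 tT ([] : List Char) (rep1 tC ([] : List Char) (rep1 tH ([] : List Char) (rep1 tS ([] : List Char) (rep1 tT ([] : List Char) (rep1 tC ([] : List Char) (rep1 tH ([] : List Char) (F tH tC tT tS)))))))) = F ([] : List Char) ([] : List Char) ([] : List Char) ([] : List Char) := by
  rw [repF tH _ ([] : List Char) _ _ _ _ holdH ok_H_H ok_H_C ok_H_T ok_H_S]
  simp only [out_self, out_ne _ _ _ ne_C_H, out_ne _ _ _ ne_T_H, out_ne _ _ _ ne_S_H]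
  rw [repF tC _ ([] : List Char) _ _ _ _ holdC ok_C_nil ok_C_C ok_C_T ok_C_S]
  simp only [out_ne _ _ _ ne_nil_C, out_self, out_ne _ _ _ ne_T_C, out_ne _ _ _ ne_S_C]
  rw [repF tT _ ([] : List Char) _ _ _ _ holdT ok_T_nil ok_T_nil ok_T_T ok_T_S]
  simp only [out_ne _ _ _ ne_nil_T, out_self, out_ne _ _ _ ne_S_T]
  rw [repF tS _ ([] : List Char) _ _ _ _ holdS ok_S_nil ok_S_nil ok_S_nil ok_S_S]
  simp only [out_ne _ _ _ ne_nil_S, out_self]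
  rw [repF tH _ ([] : List Char) _ _ _ _ holdH ok_H_nil ok_H_nil ok_H_nil ok_H_nil]
  simp only [out_ne _ _ _ ne_nil_H]
  rw [repF tC _ ([] : List Char) _ _ _ _ holdC ok_C_nil ok_C_nil ok_C_nil ok_C_nil]
  simp only [out_ne _ _ _ ne_nil_C]
  rw [repF tT _ ([] : List Char) _ _ _ _ holdT ok_T_nil ok_T_nil ok_T_nil ok_T_nil]
  simp only [out_ne _ _ _ ne_nil_T]
  rw [repF tS _ ([] : List Char) _ _ _ _ holdS ok_S_nil ok_S_nil ok_S_nil ok_S_nil]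
  simp only [out_ne _ _ _ ne_nil_S]

-- ===== VERDICT (by name: the statement is the Claim_ definition above) =====
theorem replace_nav_spec : Claim_equal_replace_nav := by
  intro html page _
  show replace_nav html page = replace_nav_alt html page
  rw [alt_eval]
  simp only [replace_nav, pvPatterns, List.foldl]
  by_cases hH : page = "home"
  · subst hH
    simp only [String.reduceEq, reduceIte]
    simp only [replace_eq_H, replace_eq_C, replace_eq_T, replace_eq_S, String.toList_ofList,
      emptyToList, actToList, navLs]
    rw [valA_H]; rfl
  by_cases hC : page = "calendar"
  · subst hC
    simp only [String.reduceEq, reduceIte]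
    simp only [replace_eq_H, replace_eq_C, replace_eq_T, replace_eq_S, String.toList_ofList,
      emptyToList, actToList, navLs]
    rw [valA_C]; rfl
  by_cases hT : page = "timeline"
  · subst hT
    simp only [String.reduceEq, reduceIte]
    simp only [replace_eq_H, replace_eq_C, replace_eq_T, replace_eq_S, String.toList_ofList,
      emptyToList, actToList, navLs]
    rw [valA_T]; rfl
  by_cases hS : page = "settings"
  · subst hS
    simp only [String.reduceEq, reduceIte]
    simp only [replace_eq_H, replace_eq_C, replace_eq_T, replace_eq_S, String.toList_ofList,
      emptyToList, actToList, navLs]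
    rw [valA_S]; rfl
  rw [if_neg hH, if_neg hC, if_neg hT, if_neg hS,
      if_neg (fun h => hH h.symm), if_neg (fun h => hC h.symm),
      if_neg (fun h => hT h.symm), if_neg (fun h => hS h.symm)]
  simp only [replace_eq_H, replace_eq_C, replace_eq_T, replace_eq_S, String.toList_ofList,
    emptyToList, navLs]
  rw [valA_none]; rfl
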